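-- pv_equiv track=rewrite | github.com/tk309/Colour-Name-Converter-CNC- | cncapp.py | search_color_names
-- ===== SOURCE A (Python) =====
-- def search_color_names(query, colors_dict, max_results=8):
--     """
--     Search engine for color names.
--     Priority: exact match → starts with query → word starts with query → contains query.
--     Returns a list of (name, hex_code, match_type) tuples.
--     """
--     q = query.strip().lower()
--     if not q:
--         return []
--
--     exact, starts, word_starts, contains = [], [], [], []
--
--     for name, code in colors_dict.items():
--         name_lower = name.lower()
--         words = name_lower.split()
--         if name_lower == q:
--             exact.append((name, code, "exact"))
--         elif name_lower.startswith(q):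
--             starts.append((name, code, "starts_with"))
--         elif any(w.startswith(q) for w in words):
--             word_starts.append((name, code, "word_match"))
--         elif q in name_lower:
--             contains.append((name, code, "contains"))
--
--     for tier in (starts, word_starts, contains):
--         tier.sort(key=lambda x: x[0])
--
--     return (exact + starts + word_starts + contains)[:max_results]
-- ===== SOURCE B (Python) =====
-- def search_color_names(query, colors_dict, max_results=8):
--     """Decorate-sort-undecorate: tag each matching name with a (tier, sort_key)
--     pair, do ONE stable global sort of the tagged list, slice, strip the tags."""
--     q = query.strip().lower()
--     if not q:
--         return []
--     decorated = []
--     for name, code in colors_dict.items():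
--         nl = name.lower()
--         if nl == q:
--             tag = (0, "")          # exact matches keep dict order (equal tags, stable sort)
--         elif nl.startswith(q):
--             tag = (1, name)
--         elif any(w.startswith(q) for w in nl.split()):
--             tag = (2, name)
--         elif q in nl:
--             tag = (3, name)
--         else:
--             continue
--         decorated.append((tag, name, code))
--     decorated.sort(key=lambda t: t[0])
--     labels = ("exact", "starts_with", "word_match", "contains")
--     return [(name, code, labels[tag[0]]) for tag, name, code in decorated[:max_results]]
-- ===== Notes on version B (the rewrite author's own statement) =====
-- stated objective: alternative
-- what changed: Replaces A's four mutable tier buckets and three separate per-tier sorts with a decorate-sort-undecorate scheme: each matching name is tagged once with a (tier, sort_key) pair, the whole tagged list is sorted by ONE stable global sort on the composite key (exact matches get an empty sort key so stability preserves dict order), then sliced and untagged.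
import Mathlib
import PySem

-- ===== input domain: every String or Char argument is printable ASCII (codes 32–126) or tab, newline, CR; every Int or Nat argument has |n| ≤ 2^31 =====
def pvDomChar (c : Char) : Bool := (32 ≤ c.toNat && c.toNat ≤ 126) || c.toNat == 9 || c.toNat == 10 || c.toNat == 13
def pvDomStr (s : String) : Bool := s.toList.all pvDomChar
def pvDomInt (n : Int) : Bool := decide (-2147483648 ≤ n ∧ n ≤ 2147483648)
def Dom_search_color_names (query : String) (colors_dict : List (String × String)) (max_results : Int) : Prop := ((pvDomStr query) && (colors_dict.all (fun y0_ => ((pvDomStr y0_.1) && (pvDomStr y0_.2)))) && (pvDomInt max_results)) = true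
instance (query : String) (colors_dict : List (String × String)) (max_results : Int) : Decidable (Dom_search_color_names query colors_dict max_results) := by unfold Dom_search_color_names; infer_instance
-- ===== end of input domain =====

-- B replaces A's four tier buckets and three per-tier sorts by a decorate / one global stable sort / undecorate scheme (alternative decomposition, same cost).

-- ===== PORT A =====
-- one step of A's for-loop over the four accumulators (the if/elif cascade)
def scnStep (q : String) (acc : List (String × String × String) × List (String × String × String) × List (String × String × String) × List (String × String × String)) (p : String × String) : List (String × String × String) × List (String × String × String) × List (String × String × String) × List (String × String × String) :=
  let nl := PySem.Str.lower p.1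
  let words := PySem.Str.split₀ nl
  if nl = q then (acc.1 ++ [(p.1, p.2, "exact")], acc.2.1, acc.2.2.1, acc.2.2.2)
  else if PySem.Str.startswith nl q then (acc.1, acc.2.1 ++ [(p.1, p.2, "starts_with")], acc.2.2.1, acc.2.2.2)
  else if words.any (fun w => PySem.Str.startswith w q) then (acc.1, acc.2.1, acc.2.2.1 ++ [(p.1, p.2, "word_match")], acc.2.2.2)
  else if PySem.Str.isIn q nl then (acc.1, acc.2.1, acc.2.2.1, acc.2.2.2 ++ [(p.1, p.2, "contains")])
  else acc

def search_color_names (query : String) (colors_dict : List (String × String)) (max_results : Int) : List (String × String × String) :=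
  let q := PySem.Str.lower (PySem.Str.strip query)
  if q = "" then []
  else
    let r := colors_dict.foldl (scnStep q) ([], [], [], [])
    PySem.List.slice
      (r.1 ++ PySem.List.sorted r.2.1 (fun x => x.1) ++ PySem.List.sorted r.2.2.1 (fun x => x.1) ++ PySem.List.sorted r.2.2.2 (fun x => x.1))
      none (some max_results)

-- ===== PORT B =====
-- the (tier, sort_key) tag of B's if/elif cascade; none = Python's `continue`
def scnTag (q : String) (p : String × String) : Option (Int × String) :=
  let nl := PySem.Str.lower p.1
  if nl = q then some (0, "")
  else if PySem.Str.startswith nl q then some (1, p.1)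
  else if (PySem.Str.split₀ nl).any (fun w => PySem.Str.startswith w q) then some (2, p.1)
  else if PySem.Str.isIn q nl then some (3, p.1)
  else none

-- one step of B's decorating loop (append the tagged entry, or skip)
def scnBStep (q : String) (acc : List ((Int × String) × String × String)) (p : String × String) : List ((Int × String) × String × String) :=
  match scnTag q p with
  | some tag => acc ++ [(tag, p.1, p.2)]
  | none => acc

def search_color_names_alt (query : String) (colors_dict : List (String × String)) (max_results : Int) : List (String × String × String) :=
  let q := PySem.Str.lower (PySem.Str.strip query)
  if q = "" then []
  else
    let decorated := colors_dict.foldl (scnBStep q) []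
    let sortedDec := PySem.List.sorted2 decorated (fun t => t.1.1) (fun t => t.1.2)
    (PySem.List.slice sortedDec none (some max_results)).map
      (fun t => (t.2.1, t.2.2, PySem.List.pyGetD ["exact", "starts_with", "word_match", "contains"] t.1.1 ""))

-- ===== PRECONDITION & SPEC =====
def Spec_search_color_names (query : String) (colors_dict : List (String × String)) (max_results : Int) (out : List (String × String × String)) : Prop := out = search_color_names_alt query colors_dict max_results
instance (query : String) (colors_dict : List (String × String)) (max_results : Int) (out : List (String × String × String)) : Decidable (Spec_search_color_names query colors_dict max_results out) := by unfold Spec_search_color_names; infer_instance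

-- ===== CLAIM (what is proved, stated in full; the proofs are below) =====
def Claim_equal_search_color_names : Prop := ∀ (query : String) (colors_dict : List (String × String)) (max_results : Int), Dom_search_color_names query colors_dict max_results → Spec_search_color_names query colors_dict max_results (search_color_names query colors_dict max_results)

-- ===== LEMMAS AND PROOFS =====

-- abbreviation for the decorated-tuple type
abbrev ScnD : Type := (Int × String) × String × String

-- the comparison sorted2 uses on tags (tier first, then the sort key)
def scnLt (a b : ScnD) : Bool :=
  decide (a.1.1 < b.1.1) || (!decide (b.1.1 < a.1.1) && decide (a.1.2 < b.1.2))

-- B's global sort, in foldl/insertBy form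
def scnSort (ds : List ScnD) : List ScnD :=
  ds.foldl (fun acc x => PySem.List.insertBy scnLt x acc) []

theorem scnSort_eq_sorted2 (ds : List ScnD) :
    PySem.List.sorted2 ds (fun t => t.1.1) (fun t => t.1.2) = scnSort ds := rfl

theorem scnSort_append_singleton (ds : List ScnD) (d : ScnD) :
    scnSort (ds ++ [d]) = PySem.List.insertBy scnLt d (scnSort ds) := by
  simp [scnSort, List.foldl_append]

theorem mem_scnSort {x : ScnD} {ds : List ScnD} (h : x ∈ scnSort ds) : x ∈ ds :=
  ((PySem.List.sorted2_perm ds (fun t : ScnD => t.1.1) (fun t : ScnD => t.1.2) false).mem_iff).mp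
    (by rwa [scnSort_eq_sorted2])

-- defining equations of insertBy (definitional; named for use in rewriting)
theorem scn_insertBy_nil {α : Type} (before : α → α → Bool) (x : α) :
    PySem.List.insertBy before x [] = [x] := rfl

theorem scn_insertBy_cons {α : Type} (before : α → α → Bool) (x y : α) (ys : List α) :
    PySem.List.insertBy before x (y :: ys) =
      if before x y = true then x :: y :: ys else y :: PySem.List.insertBy before x ys := rfl

-- insertBy passes over a prefix it does not insert into
theorem insertBy_append_of_not_before {α : Type} (before : α → α → Bool) (x : α)
    (X R : List α) (h : ∀ y ∈ X, before x y = false) :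
    PySem.List.insertBy before x (X ++ R) = X ++ PySem.List.insertBy before x R := by
  induction X with
  | nil => simp
  | cons a X ih =>
    have ha := h a (by simp)
    rw [List.cons_append, scn_insertBy_cons, if_neg (by simp [ha]),
      ih (fun y hy => h y (by simp [hy])), List.cons_append]

-- insertBy stops before a suffix every element of which it goes before
theorem insertBy_append_of_before {α : Type} (before : α → α → Bool) (x : α)
    (X R : List α) (h : ∀ y ∈ R, before x y = true) :
    PySem.List.insertBy before x (X ++ R) = PySem.List.insertBy before x X ++ R := by
  induction X with
  | nil =>
    cases R with
    | nil => simp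
    | cons r rs =>
      rw [List.nil_append, scn_insertBy_cons, if_pos (h r (by simp)), scn_insertBy_nil]
      rfl
  | cons a X ih =>
    by_cases hb : before x a = true
    · rw [List.cons_append, scn_insertBy_cons, if_pos hb, scn_insertBy_cons, if_pos hb]
      rfl
    · rw [List.cons_append, scn_insertBy_cons, if_neg hb, ih, scn_insertBy_cons, if_neg hb,
        List.cons_append]

theorem scnLt_of_tier_lt {a b : ScnD} (h : a.1.1 < b.1.1) : scnLt a b = true := by
  simp [scnLt, h]

theorem scnLt_of_tier_gt {a b : ScnD} (h : b.1.1 < a.1.1) : scnLt a b = false := by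
  have h1 : ¬ a.1.1 < b.1.1 := by omega
  simp [scnLt, h, h1]

-- insertBy commutes with map when the comparison factors through the map
theorem insertBy_map {α β : Type} (before : α → α → Bool) (before' : β → β → Bool)
    (f : α → β) (hf : ∀ x y, before' (f x) (f y) = before x y) (x : α) (ys : List α) :
    PySem.List.insertBy before' (f x) (ys.map f) = (PySem.List.insertBy before x ys).map f := by
  induction ys with
  | nil => simp [scn_insertBy_nil]
  | cons a ys ih =>
    rw [List.map_cons, scn_insertBy_cons, scn_insertBy_cons, hf]
    by_cases hb : before x a = true
    · rw [if_pos hb, if_pos hb, List.map_cons, List.map_cons]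
    · rw [if_neg hb, if_neg hb, List.map_cons, ih]

theorem foldl_insertBy_map {α β : Type} (before : α → α → Bool) (before' : β → β → Bool)
    (f : α → β) (hf : ∀ x y, before' (f x) (f y) = before x y) (l : List α) :
    ∀ acc : List α,
      (l.map f).foldl (fun a x => PySem.List.insertBy before' x a) (acc.map f) =
        (l.foldl (fun a x => PySem.List.insertBy before x a) acc).map f := by
  induction l with
  | nil => intro acc; simp
  | cons a l ih =>
    intro acc
    simp only [List.map_cons, List.foldl_cons]
    rw [insertBy_map before before' f hf a acc]
    exact ih _

-- the shared core: stable insertion sort of (name, code) pairs by name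
def scnPairSort (xs : List (String × String)) : List (String × String) :=
  xs.foldl (fun acc x => PySem.List.insertBy (fun a b : String × String => decide (a.1 < b.1)) x acc) []

-- the four tier predicates of the elif cascade, and the decorators / A's triples
def scnT0 (q : String) (p : String × String) : Bool := PySem.Str.lower p.1 == q
def scnT1 (q : String) (p : String × String) : Bool :=
  !(PySem.Str.lower p.1 == q) && PySem.Str.startswith (PySem.Str.lower p.1) q
def scnT2 (q : String) (p : String × String) : Bool :=
  !PySem.Str.startswith (PySem.Str.lower p.1) q &&
    (PySem.Str.split₀ (PySem.Str.lower p.1)).any (fun w => PySem.Str.startswith w q)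
def scnT3 (q : String) (p : String × String) : Bool :=
  PySem.Str.isIn q (PySem.Str.lower p.1) && !PySem.Str.startswith (PySem.Str.lower p.1) q &&
    !(PySem.Str.split₀ (PySem.Str.lower p.1)).any (fun w => PySem.Str.startswith w q)

def scnDec (j : Int) (p : String × String) : ScnD := ((j, if j = 0 then "" else p.1), p.1, p.2)

-- one decorated entry (or nothing) per dict item
def scnG (q : String) (p : String × String) : List ScnD :=
  match scnTag q p with
  | some tag => [(tag, p.1, p.2)]
  | none => []

-- a name equal to the query starts with the query
theorem scn_eq_startswith (s q : String) (h : s = q) : PySem.Str.startswith s q = true := by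
  subst h
  rw [PySem.Str.startswith_eq]
  exact (PySem.Chars.startswith_iff _ _).mpr (List.prefix_refl _)

theorem scnBStep_foldl (q : String) (l : List (String × String)) :
    ∀ acc, l.foldl (scnBStep q) acc = acc ++ l.flatMap (scnG q) := by
  induction l with
  | nil => intro acc; simp
  | cons p l ih =>
    intro acc
    simp only [List.foldl_cons, List.flatMap_cons, ih]
    cases h : scnTag q p <;> simp [scnBStep, scnG, h]

-- the decorator's cascade, written as a plain if-chain
theorem scnG_eq (q : String) (p : String × String) : scnG q p =
    if PySem.Str.lower p.1 = q then [(((0:Int), ""), p.1, p.2)]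
    else if PySem.Str.startswith (PySem.Str.lower p.1) q then [(((1:Int), p.1), p.1, p.2)]
    else if (PySem.Str.split₀ (PySem.Str.lower p.1)).any (fun w => PySem.Str.startswith w q) then [(((2:Int), p.1), p.1, p.2)]
    else if PySem.Str.isIn q (PySem.Str.lower p.1) then [(((3:Int), p.1), p.1, p.2)]
    else [] := by
  simp only [scnG, scnTag]
  by_cases h1 : PySem.Str.lower p.1 = q
  · rw [if_pos h1, if_pos h1]
  · rw [if_neg h1, if_neg h1]
    cases hS : PySem.Str.startswith (PySem.Str.lower p.1) q <;>
      cases hW : (PySem.Str.split₀ (PySem.Str.lower p.1)).any (fun w => PySem.Str.startswith w q) <;>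
      cases hC : PySem.Str.isIn q (PySem.Str.lower p.1) <;> rfl

theorem scnG_tiers {q : String} {p : String × String} {d : ScnD} (h : d ∈ scnG q p) :
    d.1.1 = 0 ∨ d.1.1 = 1 ∨ d.1.1 = 2 ∨ d.1.1 = 3 := by
  rw [scnG_eq] at h
  split_ifs at h <;> simp_all

theorem scnFlat_tiers {q : String} {l : List (String × String)} {d : ScnD}
    (h : d ∈ l.flatMap (scnG q)) : d.1.1 = 0 ∨ d.1.1 = 1 ∨ d.1.1 = 2 ∨ d.1.1 = 3 := by
  rcases List.mem_flatMap.mp h with ⟨p, _, hd⟩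
  exact scnG_tiers hd

theorem flatMap_ite_singleton {α β : Type} (t : α → Bool) (d : α → β) (l : List α) :
    l.flatMap (fun p => if t p then [d p] else []) = (l.filter t).map d := by
  induction l with
  | nil => rfl
  | cons a l ih => cases h : t a <;> simp [List.flatMap_cons, List.filter_cons, h, ih]

theorem filter_flatMap {α β : Type} (g : α → List β) (f : β → Bool) (l : List α) :
    (l.flatMap g).filter f = l.flatMap (fun p => (g p).filter f) := by
  induction l with
  | nil => rfl
  | cons a l ih => simp [List.flatMap_cons, List.filter_append, ih]

-- per-item class filters of the decorator
theorem scnG_filter0 (q : String) (p : String × String) :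
    (scnG q p).filter (fun d => d.1.1 == (0 : Int)) = if scnT0 q p then [scnDec 0 p] else [] := by
  rw [scnG_eq]
  by_cases h1 : PySem.Str.lower p.1 = q
  · rw [if_pos h1]
    simp_all [scnT0, scnDec, List.filter]
  · rw [if_neg h1]
    by_cases hS : PySem.Str.startswith (PySem.Str.lower p.1) q = true
    · rw [if_pos hS]
      simp_all [scnT0, List.filter]
    · rw [if_neg hS]
      by_cases hW : ((PySem.Str.split₀ (PySem.Str.lower p.1)).any (fun w => PySem.Str.startswith w q)) = true
      · rw [if_pos hW]
        simp_all [scnT0, List.filter]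
      · rw [if_neg hW]
        by_cases hC : PySem.Str.isIn q (PySem.Str.lower p.1) = true
        · rw [if_pos hC]
          simp_all [scnT0, List.filter]
        · rw [if_neg hC]
          simp_all [scnT0, List.filter]

theorem scnG_filter1 (q : String) (p : String × String) :
    (scnG q p).filter (fun d => d.1.1 == (1 : Int)) = if scnT1 q p then [scnDec 1 p] else [] := by
  rw [scnG_eq]
  by_cases h1 : PySem.Str.lower p.1 = q
  · rw [if_pos h1]
    simp_all [scnT1, List.filter]
  · rw [if_neg h1]
    by_cases hS : PySem.Str.startswith (PySem.Str.lower p.1) q = true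
    · rw [if_pos hS]
      simp_all [scnT1, scnDec, List.filter]
    · rw [if_neg hS]
      by_cases hW : ((PySem.Str.split₀ (PySem.Str.lower p.1)).any (fun w => PySem.Str.startswith w q)) = true
      · rw [if_pos hW]
        simp_all [scnT1, List.filter]
      · rw [if_neg hW]
        by_cases hC : PySem.Str.isIn q (PySem.Str.lower p.1) = true
        · rw [if_pos hC]
          simp_all [scnT1, List.filter]
        · rw [if_neg hC]
          simp_all [scnT1, List.filter]

theorem scnG_filter2 (q : String) (p : String × String) :
    (scnG q p).filter (fun d => d.1.1 == (2 : Int)) = if scnT2 q p then [scnDec 2 p] else [] := by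
  rw [scnG_eq]
  by_cases h1 : PySem.Str.lower p.1 = q
  · have hS := scn_eq_startswith _ _ h1
    rw [if_pos h1]
    simp_all [scnT2, List.filter]
  · rw [if_neg h1]
    by_cases hS : PySem.Str.startswith (PySem.Str.lower p.1) q = true
    · rw [if_pos hS]
      simp_all [scnT2, List.filter]
    · rw [if_neg hS]
      by_cases hW : ((PySem.Str.split₀ (PySem.Str.lower p.1)).any (fun w => PySem.Str.startswith w q)) = true
      · rw [if_pos hW]
        simp_all [scnT2, scnDec, List.filter]
      · rw [if_neg hW]
        by_cases hC : PySem.Str.isIn q (PySem.Str.lower p.1) = true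
        · rw [if_pos hC]
          simp_all [scnT2, List.filter]
        · rw [if_neg hC]
          simp_all [scnT2, List.filter]

theorem scnG_filter3 (q : String) (p : String × String) :
    (scnG q p).filter (fun d => d.1.1 == (3 : Int)) = if scnT3 q p then [scnDec 3 p] else [] := by
  rw [scnG_eq]
  by_cases h1 : PySem.Str.lower p.1 = q
  · have hS := scn_eq_startswith _ _ h1
    rw [if_pos h1]
    simp_all [scnT3, List.filter]
  · rw [if_neg h1]
    by_cases hS : PySem.Str.startswith (PySem.Str.lower p.1) q = true
    · rw [if_pos hS]
      simp_all [scnT3, List.filter]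
    · rw [if_neg hS]
      by_cases hW : ((PySem.Str.split₀ (PySem.Str.lower p.1)).any (fun w => PySem.Str.startswith w q)) = true
      · rw [if_pos hW]
        simp_all [scnT3, List.filter]
      · rw [if_neg hW]
        by_cases hC : PySem.Str.isIn q (PySem.Str.lower p.1) = true
        · rw [if_pos hC]
          simp_all [scnT3, scnDec, List.filter]
        · rw [if_neg hC]
          simp_all [scnT3, List.filter]

-- per-class filters of the whole decorated list are the decorated tier buckets
theorem scnFilter0 (q : String) (l : List (String × String)) :
    (l.flatMap (scnG q)).filter (fun d => d.1.1 == (0 : Int)) =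
      (l.filter (scnT0 q)).map (scnDec 0) := by
  rw [filter_flatMap]
  simp only [scnG_filter0]
  exact flatMap_ite_singleton _ _ _

theorem scnFilter1 (q : String) (l : List (String × String)) :
    (l.flatMap (scnG q)).filter (fun d => d.1.1 == (1 : Int)) =
      (l.filter (scnT1 q)).map (scnDec 1) := by
  rw [filter_flatMap]
  simp only [scnG_filter1]
  exact flatMap_ite_singleton _ _ _

theorem scnFilter2 (q : String) (l : List (String × String)) :
    (l.flatMap (scnG q)).filter (fun d => d.1.1 == (2 : Int)) =
      (l.filter (scnT2 q)).map (scnDec 2) := by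
  rw [filter_flatMap]
  simp only [scnG_filter2]
  exact flatMap_ite_singleton _ _ _

theorem scnFilter3 (q : String) (l : List (String × String)) :
    (l.flatMap (scnG q)).filter (fun d => d.1.1 == (3 : Int)) =
      (l.filter (scnT3 q)).map (scnDec 3) := by
  rw [filter_flatMap]
  simp only [scnG_filter3]
  exact flatMap_ite_singleton _ _ _

-- the class decomposition of the single stable sort
theorem scnSort_decomp (ds : List ScnD)
    (h : ∀ d ∈ ds, d.1.1 = 0 ∨ d.1.1 = 1 ∨ d.1.1 = 2 ∨ d.1.1 = 3) :
    scnSort ds =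
      scnSort (ds.filter (fun d => d.1.1 == (0 : Int))) ++
      scnSort (ds.filter (fun d => d.1.1 == (1 : Int))) ++
      scnSort (ds.filter (fun d => d.1.1 == (2 : Int))) ++
      scnSort (ds.filter (fun d => d.1.1 == (3 : Int))) := by
  induction ds using List.reverseRecOn with
  | nil => rfl
  | append_singleton ds d ih =>
    have hds : ∀ d' ∈ ds, d'.1.1 = 0 ∨ d'.1.1 = 1 ∨ d'.1.1 = 2 ∨ d'.1.1 = 3 :=
      fun d' hd' => h d' (by simp [hd'])
    have memTier : ∀ (j : Int) (y : ScnD),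
        y ∈ scnSort (ds.filter (fun d => d.1.1 == j)) → y.1.1 = j := by
      intro j y hy
      have := List.of_mem_filter (mem_scnSort hy)
      simpa using this
    rw [scnSort_append_singleton, ih hds]
    rcases h d (by simp) with hc | hc | hc | hc
    · -- tier 0: insert at the end of class 0
      rw [List.append_assoc, List.append_assoc,
        insertBy_append_of_before scnLt d _ _
          (by
            intro y hy
            simp only [List.mem_append] at hy
            rcases hy with hy | hy | hy
            · exact scnLt_of_tier_lt (by rw [hc, memTier 1 y hy]; norm_num)
            · exact scnLt_of_tier_lt (by rw [hc, memTier 2 y hy]; norm_num)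
            · exact scnLt_of_tier_lt (by rw [hc, memTier 3 y hy]; norm_num)),
        ← scnSort_append_singleton]
      simp only [List.filter_append, List.filter_cons, List.filter_nil, hc]
      norm_num
    · -- tier 1
      rw [List.append_assoc, List.append_assoc,
        insertBy_append_of_not_before scnLt d _ _
          (fun y hy => scnLt_of_tier_gt (by rw [hc, memTier 0 y hy]; norm_num)),
        List.append_assoc,
        insertBy_append_of_before scnLt d _ _
          (by
            intro y hy
            simp only [List.mem_append] at hy
            rcases hy with hy | hy
            · exact scnLt_of_tier_lt (by rw [hc, memTier 2 y hy]; norm_num)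
            · exact scnLt_of_tier_lt (by rw [hc, memTier 3 y hy]; norm_num)),
        ← scnSort_append_singleton]
      simp only [List.filter_append, List.filter_cons, List.filter_nil, hc]
      norm_num
    · -- tier 2
      rw [List.append_assoc, List.append_assoc,
        insertBy_append_of_not_before scnLt d _ _
          (fun y hy => scnLt_of_tier_gt (by rw [hc, memTier 0 y hy]; norm_num)),
        insertBy_append_of_not_before scnLt d _ _
          (fun y hy => scnLt_of_tier_gt (by rw [hc, memTier 1 y hy]; norm_num)),
        insertBy_append_of_before scnLt d _ _
          (fun y hy => scnLt_of_tier_lt (by rw [hc, memTier 3 y hy]; norm_num)),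
        ← scnSort_append_singleton]
      simp only [List.filter_append, List.filter_cons, List.filter_nil, hc]
      norm_num
    · -- tier 3
      rw [List.append_assoc, List.append_assoc,
        insertBy_append_of_not_before scnLt d _ _
          (fun y hy => scnLt_of_tier_gt (by rw [hc, memTier 0 y hy]; norm_num)),
        insertBy_append_of_not_before scnLt d _ _
          (fun y hy => scnLt_of_tier_gt (by rw [hc, memTier 1 y hy]; norm_num)),
        insertBy_append_of_not_before scnLt d _ _
          (fun y hy => scnLt_of_tier_gt (by rw [hc, memTier 2 y hy]; norm_num)),
        ← scnSort_append_singleton]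
      simp only [List.filter_append, List.filter_cons, List.filter_nil, hc]
      norm_num

-- class 0 is left in dict order: all its tags are equal, so no insertion moves
theorem scnSort_const0 (xs : List (String × String)) :
    scnSort (xs.map (scnDec 0)) = xs.map (scnDec 0) := by
  induction xs using List.reverseRecOn with
  | nil => rfl
  | append_singleton xs p ih =>
    rw [List.map_append, List.map_singleton, scnSort_append_singleton, ih,
      PySem.List.insertBy_of_forall_not_before]
    intro y hy
    rcases List.mem_map.mp hy with ⟨p', _, rfl⟩
    simp [scnLt, scnDec]

-- sorting a decorated class (tier ≥ 1) is sorting the pairs, then decorating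
theorem scnSort_class (j : Int) (hj : j ≠ 0) (xs : List (String × String)) :
    scnSort (xs.map (scnDec j)) = (scnPairSort xs).map (scnDec j) := by
  have := foldl_insertBy_map (fun a b : String × String => decide (a.1 < b.1)) scnLt
    (scnDec j) (by intro x y; simp [scnLt, scnDec, hj]) xs []
  simpa [scnSort, scnPairSort] using this

-- A's per-tier sort is sorting the pairs, then building the triples
theorem scnASort_class (lbl : String) (xs : List (String × String)) :
    PySem.List.sorted (xs.map (fun p => (p.1, p.2, lbl))) (fun x => x.1) =
      (scnPairSort xs).map (fun p => (p.1, p.2, lbl)) := by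
  rw [PySem.List.sorted_eq_foldl_insertBy]
  have := foldl_insertBy_map (fun a b : String × String => decide (a.1 < b.1))
    (fun a b : String × String × String => decide (a.1 < b.1))
    (fun p : String × String => (p.1, p.2, lbl)) (by intro x y; rfl) xs []
  simpa [scnPairSort] using this

-- A's loop, run from any accumulator state, appends the four filtered tier buckets
theorem scn_loop_char (q : String) (l : List (String × String))
    (e s w c : List (String × String × String)) :
    l.foldl (scnStep q) (e, s, w, c) =
      (e ++ (l.filter (scnT0 q)).map (fun p => (p.1, p.2, "exact")),
       s ++ (l.filter (scnT1 q)).map (fun p => (p.1, p.2, "starts_with")),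
       w ++ (l.filter (scnT2 q)).map (fun p => (p.1, p.2, "word_match")),
       c ++ (l.filter (scnT3 q)).map (fun p => (p.1, p.2, "contains"))) := by
  induction l generalizing e s w c with
  | nil => simp
  | cons hd tl ih =>
    by_cases h1 : PySem.Str.lower hd.1 = q
    · have hE : (PySem.Str.lower hd.1 == q) = true := by simp [h1]
      have hS := scn_eq_startswith _ _ h1
      simp only [List.foldl_cons, scnStep, List.filter_cons, scnT0, scnT1, scnT2, scnT3,
        if_pos h1, hE, hS]
      simp_all [scnT0, scnT1, scnT2, scnT3, List.filter_cons]
    · have hE : (PySem.Str.lower hd.1 == q) = false := by simp [h1]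
      cases hS : PySem.Str.startswith (PySem.Str.lower hd.1) q with
      | true =>
        simp only [List.foldl_cons, scnStep, if_neg h1, hS]
        simp_all [scnT0, scnT1, scnT2, scnT3, List.filter_cons]
      | false =>
        cases hW : (PySem.Str.split₀ (PySem.Str.lower hd.1)).any (fun w => PySem.Str.startswith w q) with
        | true =>
          simp only [List.foldl_cons, scnStep, if_neg h1, hS, hW]
          simp_all [scnT0, scnT1, scnT2, scnT3, List.filter_cons]
        | false =>
          cases hC : PySem.Str.isIn q (PySem.Str.lower hd.1) with
          | true =>
            simp only [List.foldl_cons, scnStep, if_neg h1, hS, hW, hC]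
            simp_all [scnT0, scnT1, scnT2, scnT3, List.filter_cons]
          | false =>
            simp only [List.foldl_cons, scnStep, if_neg h1, hS, hW, hC]
            simp_all [scnT0, scnT1, scnT2, scnT3, List.filter_cons]

-- a slice from the start commutes with map
theorem scn_slice_map {α β : Type} (f : α → β) (l : List α) (b : Int) :
    PySem.List.slice (l.map f) none (some b) = (PySem.List.slice l none (some b)).map f := by
  simp [PySem.List.slice, PySem.List.clampIdx, List.map_take, List.map_drop]

-- undecorating a decorated tier bucket gives A's triples
theorem scn_undec (j : Int) (lbl : String)
    (hlbl : PySem.List.pyGetD ["exact", "starts_with", "word_match", "contains"] j "" = lbl)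
    (xs : List (String × String)) :
    (xs.map (scnDec j)).map
        (fun t : ScnD => (t.2.1, t.2.2, PySem.List.pyGetD ["exact", "starts_with", "word_match", "contains"] t.1.1 "")) =
      xs.map (fun p => (p.1, p.2, lbl)) := by
  rw [List.map_map]
  exact List.map_congr_left (fun p _ => by simp [scnDec, hlbl])

-- ===== VERDICT (by name: the statement is the Claim_ definition above) =====
theorem search_color_names_spec : Claim_equal_search_color_names := by
  intro query colors_dict max_results _
  unfold Spec_search_color_names search_color_names search_color_names_alt
  by_cases hq : PySem.Str.lower (PySem.Str.strip query) = ""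
  · simp [hq]
  · simp only [if_neg hq]
    set q := PySem.Str.lower (PySem.Str.strip query) with hqdef
    rw [scn_loop_char q colors_dict [] [] [] []]
    rw [scnBStep_foldl q colors_dict []]
    simp only [List.nil_append]
    rw [scnSort_eq_sorted2,
      scnSort_decomp _ (fun d hd => scnFlat_tiers hd),
      scnFilter0, scnFilter1, scnFilter2, scnFilter3,
      scnSort_const0, scnSort_class 1 (by norm_num), scnSort_class 2 (by norm_num),
      scnSort_class 3 (by norm_num)]
    rw [← scn_slice_map]
    congr 1
    simp only [List.map_append]
    rw [scn_undec 0 "exact" rfl, scn_undec 1 "starts_with" rfl,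
      scn_undec 2 "word_match" rfl, scn_undec 3 "contains" rfl,
      scnASort_class "starts_with", scnASort_class "word_match", scnASort_class "contains"]
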